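-- pv_equiv track=rewrite | github.com/Ka-raS/School-Code | Nam 2 Ky 2 - Lap trinh Python/209. THỐNG KÊ DỊCH TỄ.py | potential_cases
-- ===== SOURCE A (Python) =====
-- from typing import List
--
-- def potential_cases(case_matrix: List[List[int]], rows: int, columns: int) -> int:
--     infected: list[tuple[int, int]] = []
--
--     for row in range(rows):
--         for column in range(columns):
--             if case_matrix[row][column] == -1:
--                 infected.append((row, column))
--
--     case_count = 0
--     DIRECTIONS = ((-1, -1), (-1, 0), (-1, 1), (0, -1), (0, 1), (1, -1), (1, 0), (1, 1))
--
--     for infected_row, infected_column in infected: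
--         for direction_row, direction_column in DIRECTIONS:
--             row = infected_row + direction_row
--             column = infected_column + direction_column
--
--             if row >= 0 and column >= 0 and row < rows and column < columns:
--                 case_count += case_matrix[row][column]
--                 case_matrix[row][column] = 0
--
--     return case_count
-- ===== SOURCE B (Python) =====
-- from typing import List
--
-- def potential_cases(case_matrix: List[List[int]], rows: int, columns: int) -> int:
--     # Pure computation of the same return value: a cell contributes its ORIGINAL
--     # value exactly once iff some in-bounds 8-neighbour is infected (-1) in the
--     # original matrix.  No affected list, no add-then-zero dedup, no mutation
--     # (the return-value equivalence is what is claimed; A also zeroes cells in place).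
--     def affected(r: int, c: int) -> bool:
--         for dr in (-1, 0, 1):
--             for dc in (-1, 0, 1):
--                 if dr or dc:
--                     nr, nc = r + dr, c + dc
--                     if 0 <= nr < rows and 0 <= nc < columns and case_matrix[nr][nc] == -1:
--                         return True
--         return False
--
--     return sum(case_matrix[r][c]
--                for r in range(rows) for c in range(columns)
--                if affected(r, c))
-- ===== Notes on version B (the rewrite author's own statement) =====
-- stated objective: alternative
-- what changed: A collects infected cells and deduplicates neighbour contributions by mutating visited cells to 0 and re-reading them; B is a pure single scan that sums each cell's original value once iff one of its in-bounds 8-neighbours is -1 in the original matrix, with no affected list and no mutation (return-value equivalence; A's in-place zeroing side effect is not reproduced).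
import Mathlib
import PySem

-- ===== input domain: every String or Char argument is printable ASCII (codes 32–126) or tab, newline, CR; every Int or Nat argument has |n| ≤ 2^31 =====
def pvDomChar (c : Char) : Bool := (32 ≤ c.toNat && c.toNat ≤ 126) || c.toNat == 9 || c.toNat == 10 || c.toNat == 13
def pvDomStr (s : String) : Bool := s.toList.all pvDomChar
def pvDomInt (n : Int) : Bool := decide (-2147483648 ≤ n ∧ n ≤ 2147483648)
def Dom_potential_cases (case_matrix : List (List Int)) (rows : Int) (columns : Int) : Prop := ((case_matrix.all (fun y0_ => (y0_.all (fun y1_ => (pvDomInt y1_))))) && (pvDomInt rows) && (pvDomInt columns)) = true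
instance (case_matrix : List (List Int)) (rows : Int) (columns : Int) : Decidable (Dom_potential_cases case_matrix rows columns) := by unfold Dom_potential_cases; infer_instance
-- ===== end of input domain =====

-- B replaces A's infected-list + mutate-to-zero dedup with a pure single scan summing
-- each cell's original value once iff an in-bounds 8-neighbour is -1; equal cost,
-- different algorithm.  A zeroes affected cells IN PLACE; B performs no mutation:
-- the theorems here are about the RETURN value only.

-- A-side primitive helpers: matrix read / write-zero (exact for the 0 ≤ index < length
-- accesses guaranteed by the ports' guards together with Pre_)
def pvGetCell (m : List (List Int)) (r c : Int) : Int := (m.getD r.toNat []).getD c.toNat 0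
def pvZeroCell (m : List (List Int)) (r c : Int) : List (List Int) :=
  m.set r.toNat ((m.getD r.toNat []).set c.toNat 0)
def pvDirs : List (Int × Int) := [(-1,-1),(-1,0),(-1,1),(0,-1),(0,1),(1,-1),(1,0),(1,1)]

-- ===== PORT A =====
-- first scan collects `infected`; the second loop, per infected cell and direction,
-- reads the CURRENT matrix value, adds it, and zeroes the cell (read happens before
-- the write, so both pair components use the pre-step matrix st.1)
def potential_cases (case_matrix : List (List Int)) (rows : Int) (columns : Int) : Int :=
  (((PySem.List.pyRange 0 rows 1).foldl (fun acc row =>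
      (PySem.List.pyRange 0 columns 1).foldl (fun acc column =>
        if pvGetCell case_matrix row column == -1 then acc ++ [(row, column)] else acc) acc)
      ([] : List (Int × Int))).foldl (fun (st : List (List Int) × Int) p =>
    pvDirs.foldl (fun (st : List (List Int) × Int) d =>
      if 0 ≤ p.1 + d.1 ∧ 0 ≤ p.2 + d.2 ∧ p.1 + d.1 < rows ∧ p.2 + d.2 < columns then
        (pvZeroCell st.1 (p.1 + d.1) (p.2 + d.2), st.2 + pvGetCell st.1 (p.1 + d.1) (p.2 + d.2))
      else st) st) (case_matrix, 0)).2

-- ===== PORT B =====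
-- Source B's inner helper `affected`: early-returning loops over dr, dc in (-1, 0, 1)
-- skipping (0, 0), ported as List.any over the same triples
def pvAffected (cm : List (List Int)) (rows columns r c : Int) : Bool :=
  [(-1 : Int), 0, 1].any (fun dr => [(-1 : Int), 0, 1].any (fun dc =>
    (!(dr == 0 && dc == 0)) &&
    (decide (0 ≤ r + dr) && decide (r + dr < rows) &&
     decide (0 ≤ c + dc) && decide (c + dc < columns) &&
     (pvGetCell cm (r + dr) (c + dc) == -1))))

-- Source B's `sum(... for r in range(rows) for c in range(columns) if affected(r, c))`
def potential_cases_alt (case_matrix : List (List Int)) (rows : Int) (columns : Int) : Int :=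
  (PySem.List.pyRange 0 rows 1).foldl (fun total r =>
    (PySem.List.pyRange 0 columns 1).foldl (fun total c =>
      if pvAffected case_matrix rows columns r c then total + pvGetCell case_matrix r c
      else total) total) 0

-- ===== PRECONDITION & SPEC =====
-- Exactly where A returns: either no cell is ever indexed (rows ≤ 0 or columns ≤ 0), or
-- the first `rows` rows exist and each has at least `columns` entries (else IndexError).
def Pre_potential_cases (case_matrix : List (List Int)) (rows : Int) (columns : Int) : Prop :=
  rows ≤ 0 ∨ columns ≤ 0 ∨
    (rows.toNat ≤ case_matrix.length ∧
      ∀ i < rows.toNat, columns.toNat ≤ (case_matrix.getD i []).length)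
instance (case_matrix : List (List Int)) (rows : Int) (columns : Int) : Decidable (Pre_potential_cases case_matrix rows columns) := by unfold Pre_potential_cases; infer_instance

def pvWitness_potential_cases : List (List Int) × Int × Int := ([[-1, 2], [3, 4]], 2, 2)

def Spec_potential_cases (case_matrix : List (List Int)) (rows : Int) (columns : Int) (out : Int) : Prop := out = potential_cases_alt case_matrix rows columns
instance (case_matrix : List (List Int)) (rows : Int) (columns : Int) (out : Int) : Decidable (Spec_potential_cases case_matrix rows columns out) := by unfold Spec_potential_cases; infer_instance

-- ===== CLAIM (what is proved, stated in full; the proofs are below) =====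
def Claim_equal_potential_cases : Prop := ∀ (case_matrix : List (List Int)) (rows : Int) (columns : Int), Dom_potential_cases case_matrix rows columns → Pre_potential_cases case_matrix rows columns → Spec_potential_cases case_matrix rows columns (potential_cases case_matrix rows columns)

-- ===== LEMMAS AND PROOFS =====

-- A's 'read, then zero' loop body, as one named step
def pvStep (st : List (List Int) × Int) (p : Int × Int) : List (List Int) × Int :=
  (pvZeroCell st.1 p.1 p.2, st.2 + pvGetCell st.1 p.1 p.2)

-- the in-bounds neighbours of p, in direction order
def pvNbrsOf (rows columns : Int) (p : Int × Int) : List (Int × Int) :=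
  (pvDirs.filter (fun d => decide (0 ≤ p.1 + d.1 ∧ 0 ≤ p.2 + d.2 ∧
      p.1 + d.1 < rows ∧ p.2 + d.2 < columns))).map
    (fun d => (p.1 + d.1, p.2 + d.2))

-- A's first scan, flattened
def pvInfectedL (cm : List (List Int)) (rows columns : Int) : List (Int × Int) :=
  (PySem.List.pyRange 0 rows 1).flatMap (fun row =>
    ((PySem.List.pyRange 0 columns 1).filter
      (fun column => pvGetCell cm row column == -1)).map (fun column => (row, column)))

-- the cells B sums over, in row-major order
def pvAffectedL (cm : List (List Int)) (rows columns : Int) : List (Int × Int) :=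
  (PySem.List.pyRange 0 rows 1).flatMap (fun row =>
    ((PySem.List.pyRange 0 columns 1).filter
      (fun column => pvAffected cm rows columns row column)).map (fun column => (row, column)))

lemma pvDirs_neg : ∀ d ∈ pvDirs, ((-d.1, -d.2) : Int × Int) ∈ pvDirs := by decide

lemma pvScan_eq (rows columns : Int) (Q : Int → Int → Bool) :
    (PySem.List.pyRange 0 rows 1).foldl (fun acc row =>
      (PySem.List.pyRange 0 columns 1).foldl (fun acc column =>
        if Q row column then acc ++ [(row, column)] else acc) acc) [] =
    (PySem.List.pyRange 0 rows 1).flatMap (fun row =>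
      ((PySem.List.pyRange 0 columns 1).filter (fun column => Q row column)).map
        (fun column => (row, column))) := by
  have h : (fun (acc : List (Int × Int)) row =>
      (PySem.List.pyRange 0 columns 1).foldl (fun acc column =>
        if Q row column then acc ++ [(row, column)] else acc) acc) =
      fun acc row => acc ++ ((PySem.List.pyRange 0 columns 1).filter (fun column => Q row column)).map
        (fun column => (row, column)) := by
    funext acc row
    exact PySem.List.foldl_append_if _ _ _ _
  rw [h, PySem.List.foldl_append_eq_flatMap]
  simp

-- A's inner direction loop, flattened to a fold of pvStep over the in-bounds neighbours
lemma pvDirsFold_aux (rows columns : Int) (p : Int × Int) (ds : List (Int × Int))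
    (st : List (List Int) × Int) :
    ds.foldl (fun (st : List (List Int) × Int) d =>
      if 0 ≤ p.1 + d.1 ∧ 0 ≤ p.2 + d.2 ∧ p.1 + d.1 < rows ∧ p.2 + d.2 < columns then
        (pvZeroCell st.1 (p.1 + d.1) (p.2 + d.2), st.2 + pvGetCell st.1 (p.1 + d.1) (p.2 + d.2))
      else st) st =
    ((ds.filter (fun d => decide (0 ≤ p.1 + d.1 ∧ 0 ≤ p.2 + d.2 ∧ p.1 + d.1 < rows ∧ p.2 + d.2 < columns))).map
      (fun d => (p.1 + d.1, p.2 + d.2))).foldl pvStep st := by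
  induction ds generalizing st with
  | nil => rfl
  | cons d ds ih =>
    by_cases h : 0 ≤ p.1 + d.1 ∧ 0 ≤ p.2 + d.2 ∧ p.1 + d.1 < rows ∧ p.2 + d.2 < columns
    · simp only [List.foldl_cons, List.filter_cons, decide_eq_true h, if_pos h]
      exact ih _
    · simp only [List.foldl_cons, List.filter_cons, decide_eq_false h, if_neg h]
      exact ih _

-- A's whole second phase, flattened
lemma pvFoldA_flatten (rows columns : Int) (l : List (Int × Int)) (st : List (List Int) × Int) :
    l.foldl (fun (st : List (List Int) × Int) p =>
      pvDirs.foldl (fun (st : List (List Int) × Int) d =>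
        if 0 ≤ p.1 + d.1 ∧ 0 ≤ p.2 + d.2 ∧ p.1 + d.1 < rows ∧ p.2 + d.2 < columns then
          (pvZeroCell st.1 (p.1 + d.1) (p.2 + d.2), st.2 + pvGetCell st.1 (p.1 + d.1) (p.2 + d.2))
        else st) st) st =
    (l.flatMap (pvNbrsOf rows columns)).foldl pvStep st := by
  induction l generalizing st with
  | nil => rfl
  | cons p l ih =>
    simp only [List.foldl_cons, List.flatMap_cons, List.foldl_append]
    rw [pvDirsFold_aux]
    exact ih _

-- cell-access facts
lemma pvGetCell_zero_self (m : List (List Int)) (r c : Int)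
    (hr : r.toNat < m.length) (hc : c.toNat < (m.getD r.toNat []).length) :
    pvGetCell (pvZeroCell m r c) r c = 0 := by
  simp only [pvGetCell, pvZeroCell, List.getD_eq_getElem?_getD]
  rw [List.getElem?_set_self hr]
  simp only [Option.getD_some]
  rw [List.getElem?_set_self (by simpa using hc)]
  rfl

lemma pvGetCell_zero_ne (m : List (List Int)) (r c r' c' : Int)
    (h : r.toNat ≠ r'.toNat ∨ c.toNat ≠ c'.toNat) :
    pvGetCell (pvZeroCell m r c) r' c' = pvGetCell m r' c' := by
  by_cases hrr : r.toNat = r'.toNat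
  · rcases h with h | h
    · exact absurd hrr h
    · simp only [pvGetCell, pvZeroCell, List.getD_eq_getElem?_getD, ← hrr]
      by_cases hlt : r.toNat < m.length
      · rw [List.getElem?_set_self hlt]
        simp only [Option.getD_some]
        rw [List.getElem?_set_ne h]
      · have h1 : (m.set r.toNat ((m[r.toNat]?.getD []).set c.toNat 0))[r.toNat]? = (none : Option (List Int)) :=
          List.getElem?_eq_none (by rw [List.length_set]; exact Nat.le_of_not_lt hlt)
        have h2 : m[r.toNat]? = (none : Option (List Int)) := List.getElem?_eq_none (Nat.le_of_not_lt hlt)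
        rw [h1, h2]
  · simp only [pvGetCell, pvZeroCell, List.getD_eq_getElem?_getD]
    rw [List.getElem?_set_ne hrr]

lemma pvZeroCell_rowlen (m : List (List Int)) (r c : Int) (i : Nat) :
    ((pvZeroCell m r c).getD i []).length = (m.getD i []).length := by
  by_cases hrr : r.toNat = i
  · subst hrr
    simp only [pvZeroCell, List.getD_eq_getElem?_getD]
    by_cases hlt : r.toNat < m.length
    · rw [List.getElem?_set_self hlt]
      rw [List.getElem?_eq_getElem hlt]
      simp [List.length_set]
    · have h1 : (m.set r.toNat ((m[r.toNat]?.getD []).set c.toNat 0))[r.toNat]? = (none : Option (List Int)) :=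
        List.getElem?_eq_none (by rw [List.length_set]; exact Nat.le_of_not_lt hlt)
      have h2 : m[r.toNat]? = (none : Option (List Int)) := List.getElem?_eq_none (Nat.le_of_not_lt hlt)
      rw [h1, h2]
  · simp only [pvZeroCell, List.getD_eq_getElem?_getD]
    rw [List.getElem?_set_ne hrr]

-- main invariant for A: folding the read-then-zero step over any list of in-grid
-- positions adds the ORIGINAL value of each not-yet-zeroed position, exactly once
lemma pvFold_zero (cm : List (List Int)) (rows columns : Int)
    (hlen : rows.toNat ≤ cm.length)
    (hrow : ∀ i < rows.toNat, columns.toNat ≤ (cm.getD i []).length)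
    (L : List (Int × Int))
    (hL : ∀ p ∈ L, 0 ≤ p.1 ∧ 0 ≤ p.2 ∧ p.1 < rows ∧ p.2 < columns)
    (m : List (List Int)) (S : Finset (Int × Int))
    (hshape : m.length = cm.length ∧ ∀ i, (m.getD i []).length = (cm.getD i []).length)
    (hval : ∀ q : Int × Int, (0 ≤ q.1 ∧ 0 ≤ q.2 ∧ q.1 < rows ∧ q.2 < columns) →
      pvGetCell m q.1 q.2 = if q ∈ S then 0 else pvGetCell cm q.1 q.2)
    (acc : Int) :
    (L.foldl pvStep (m, acc)).2 = acc + ∑ p ∈ L.toFinset \ S, pvGetCell cm p.1 p.2 := by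
  induction L generalizing m S acc with
  | nil => simp
  | cons p L ih =>
    have hp := hL p List.mem_cons_self
    have hrm : p.1.toNat < m.length := by rw [hshape.1]; omega
    have hcm : p.2.toNat < (m.getD p.1.toNat []).length := by
      rw [hshape.2]; have := hrow p.1.toNat (by omega); omega
    have hgp : pvGetCell m p.1 p.2 = if p ∈ S then 0 else pvGetCell cm p.1 p.2 := hval p hp
    have hstep : List.foldl pvStep (m, acc) (p :: L) =
        List.foldl pvStep (pvZeroCell m p.1 p.2, acc + pvGetCell m p.1 p.2) L := rfl
    rw [hstep]
    have hshape' : (pvZeroCell m p.1 p.2).length = cm.length ∧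
        ∀ i, ((pvZeroCell m p.1 p.2).getD i []).length = (cm.getD i []).length :=
      ⟨by unfold pvZeroCell; rw [List.length_set]; exact hshape.1,
       fun i => (pvZeroCell_rowlen m p.1 p.2 i).trans (hshape.2 i)⟩
    have hval' : ∀ q : Int × Int, (0 ≤ q.1 ∧ 0 ≤ q.2 ∧ q.1 < rows ∧ q.2 < columns) →
        pvGetCell (pvZeroCell m p.1 p.2) q.1 q.2 =
          if q ∈ insert p S then 0 else pvGetCell cm q.1 q.2 := by
      intro q hq
      by_cases hqp : q = p
      · subst hqp
        rw [pvGetCell_zero_self m q.1 q.2 hrm hcm, if_pos (Finset.mem_insert_self q S)]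
      · have hne : p.1.toNat ≠ q.1.toNat ∨ p.2.toNat ≠ q.2.toNat := by
          have : ¬(q.1 = p.1 ∧ q.2 = p.2) := fun h => hqp (Prod.ext h.1 h.2)
          omega
        rw [pvGetCell_zero_ne m p.1 p.2 q.1 q.2 hne, hval q hq]
        simp [Finset.mem_insert, hqp]
    rw [ih (fun x hx => hL x (List.mem_cons_of_mem _ hx)) _ (insert p S) hshape' hval' _]
    by_cases hpS : p ∈ S
    · rw [if_pos hpS] at hgp
      have h1 : insert p S = S := Finset.insert_eq_self.2 hpS
      have h2 : (p :: L).toFinset \ S = L.toFinset \ S := by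
        ext x
        simp only [List.toFinset_cons, Finset.mem_sdiff, Finset.mem_insert]
        constructor
        · rintro ⟨h | h, hnS⟩
          · exact absurd (h ▸ hpS) hnS
          · exact ⟨h, hnS⟩
        · rintro ⟨h, hnS⟩
          exact ⟨Or.inr h, hnS⟩
      rw [h1, h2, hgp]
      ring
    · rw [if_neg hpS] at hgp
      have h2 : (p :: L).toFinset \ S = insert p (L.toFinset \ insert p S) := by
        ext x
        simp only [List.toFinset_cons, Finset.mem_sdiff, Finset.mem_insert]
        constructor
        · rintro ⟨h | h, hnS⟩
          · exact Or.inl h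
          · by_cases hxp : x = p
            · exact Or.inl hxp
            · exact Or.inr ⟨h, fun hc => (hc.elim hxp fun hc' => hnS hc')⟩
        · rintro (h | ⟨h, hn⟩)
          · exact ⟨Or.inl h, h ▸ hpS⟩
          · exact ⟨Or.inr h, fun hc => hn (Or.inr hc)⟩
      have hnot : p ∉ L.toFinset \ insert p S := by simp
      rw [h2, Finset.sum_insert hnot, hgp]
      ring

-- generic fold-to-sum lemmas for B's pure scan
lemma pvFoldAddIf {α : Type} (xs : List α) (Q : α → Bool) (f : α → Int) (t0 : Int) :
    xs.foldl (fun t x => if Q x then t + f x else t) t0 =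
      t0 + ((xs.filter Q).map f).sum := by
  induction xs generalizing t0 with
  | nil => simp
  | cons x xs ih =>
    by_cases h : Q x = true
    · simp only [List.foldl_cons, List.filter_cons, h, if_true, List.map_cons,
        List.sum_cons, ih]
      ring
    · simp only [List.foldl_cons, List.filter_cons, h, Bool.false_eq_true, if_false, ih]

lemma pvFoldAdd {α : Type} (xs : List α) (g : α → Int) (t0 : Int) :
    xs.foldl (fun t x => t + g x) t0 = t0 + (xs.map g).sum := by
  induction xs generalizing t0 with
  | nil => simp
  | cons x xs ih => simp only [List.foldl_cons, List.map_cons, List.sum_cons, ih]; ring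

-- B's port equals the plain sum of original values over pvAffectedL
lemma pvB_eq_sum (cm : List (List Int)) (rows columns : Int) :
    potential_cases_alt cm rows columns =
      ((pvAffectedL cm rows columns).map (fun p => pvGetCell cm p.1 p.2)).sum := by
  unfold potential_cases_alt pvAffectedL
  have hinner : (fun (total : Int) r =>
      (PySem.List.pyRange 0 columns 1).foldl (fun total c =>
        if pvAffected cm rows columns r c then total + pvGetCell cm r c else total) total) =
      fun total r => total +
        (((PySem.List.pyRange 0 columns 1).filter (fun c => pvAffected cm rows columns r c)).map
          (fun c => pvGetCell cm r c)).sum := by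
    funext total r
    exact pvFoldAddIf _ _ _ _
  rw [hinner, pvFoldAdd]
  simp [List.map_flatMap, List.map_map, Function.comp_def]
  induction (PySem.List.pyRange 0 rows 1) with
  | nil => simp
  | cons r rs ih => simp [List.flatMap_cons, List.sum_append, ih]

-- Source B's `affected` agrees with the ∃-over-pvDirs characterisation
lemma pvAffected_iff (cm : List (List Int)) (rows columns r c : Int) :
    pvAffected cm rows columns r c = true ↔
      ∃ d ∈ pvDirs, 0 ≤ r + d.1 ∧ r + d.1 < rows ∧ 0 ≤ c + d.2 ∧ c + d.2 < columns ∧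
        pvGetCell cm (r + d.1) (c + d.2) = -1 := by
  constructor
  · intro h
    simp only [pvAffected, List.any_eq_true, List.mem_cons, List.not_mem_nil, or_false,
      Bool.and_eq_true, Bool.not_eq_true', decide_eq_true_eq, beq_iff_eq] at h
    obtain ⟨dr, hdr, dc, hdc, hne, ⟨⟨⟨h1, h2⟩, h3⟩, h4⟩, h5⟩ := h
    refine ⟨(dr, dc), ?_, h1, h2, h3, h4, h5⟩
    have hne' : ¬(dr = 0 ∧ dc = 0) := by
      rintro ⟨rfl, rfl⟩; simp at hne
    simp only [pvDirs, List.mem_cons, List.not_mem_nil, or_false, Prod.mk.injEq]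
    rcases hdr with rfl | rfl | rfl <;> rcases hdc with rfl | rfl | rfl <;>
      first
        | exact absurd ⟨rfl, rfl⟩ hne'
        | tauto
  · rintro ⟨d, hd, h1, h2, h3, h4, h5⟩
    simp only [pvDirs, List.mem_cons, List.not_mem_nil, or_false] at hd
    simp only [pvAffected, List.any_eq_true, List.mem_cons, List.not_mem_nil, or_false,
      Bool.and_eq_true, Bool.not_eq_true', decide_eq_true_eq, beq_iff_eq]
    rcases hd with rfl | rfl | rfl | rfl | rfl | rfl | rfl | rfl <;>
      [ exact ⟨-1, by tauto, -1, by tauto, by decide, ⟨⟨⟨h1, h2⟩, h3⟩, h4⟩, h5⟩;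
        exact ⟨-1, by tauto, 0, by tauto, by decide, ⟨⟨⟨h1, h2⟩, h3⟩, h4⟩, h5⟩;
        exact ⟨-1, by tauto, 1, by tauto, by decide, ⟨⟨⟨h1, h2⟩, h3⟩, h4⟩, h5⟩;
        exact ⟨0, by tauto, -1, by tauto, by decide, ⟨⟨⟨h1, h2⟩, h3⟩, h4⟩, h5⟩;
        exact ⟨0, by tauto, 1, by tauto, by decide, ⟨⟨⟨h1, h2⟩, h3⟩, h4⟩, h5⟩;
        exact ⟨1, by tauto, -1, by tauto, by decide, ⟨⟨⟨h1, h2⟩, h3⟩, h4⟩, h5⟩;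
        exact ⟨1, by tauto, 0, by tauto, by decide, ⟨⟨⟨h1, h2⟩, h3⟩, h4⟩, h5⟩;
        exact ⟨1, by tauto, 1, by tauto, by decide, ⟨⟨⟨h1, h2⟩, h3⟩, h4⟩, h5⟩ ]

-- membership characterisations
lemma pv_mem_infectedL (cm : List (List Int)) (rows columns : Int) (p : Int × Int) :
    p ∈ pvInfectedL cm rows columns ↔
      0 ≤ p.1 ∧ p.1 < rows ∧ 0 ≤ p.2 ∧ p.2 < columns ∧ pvGetCell cm p.1 p.2 = -1 := by
  simp only [pvInfectedL, List.mem_flatMap, List.mem_map, List.mem_filter,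
    PySem.List.mem_pyRange_one, beq_iff_eq]
  constructor
  · rintro ⟨r, hr, c, ⟨hc, hv⟩, rfl⟩
    exact ⟨hr.1, hr.2, hc.1, hc.2, hv⟩
  · rintro ⟨h1, h2, h3, h4, h5⟩
    exact ⟨p.1, ⟨h1, h2⟩, p.2, ⟨⟨h3, h4⟩, h5⟩, rfl⟩

lemma pv_mem_affectedL (cm : List (List Int)) (rows columns : Int) (p : Int × Int) :
    p ∈ pvAffectedL cm rows columns ↔
      (0 ≤ p.1 ∧ p.1 < rows ∧ 0 ≤ p.2 ∧ p.2 < columns) ∧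
        ∃ d ∈ pvDirs, 0 ≤ p.1 + d.1 ∧ p.1 + d.1 < rows ∧ 0 ≤ p.2 + d.2 ∧ p.2 + d.2 < columns ∧
          pvGetCell cm (p.1 + d.1) (p.2 + d.2) = -1 := by
  simp only [pvAffectedL, List.mem_flatMap, List.mem_map, List.mem_filter,
    PySem.List.mem_pyRange_one]
  constructor
  · rintro ⟨r, hr, c, ⟨hc, hv⟩, rfl⟩
    exact ⟨⟨hr.1, hr.2, hc.1, hc.2⟩, (pvAffected_iff cm rows columns r c).1 hv⟩
  · rintro ⟨⟨h1, h2, h3, h4⟩, hv⟩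
    exact ⟨p.1, ⟨h1, h2⟩, p.2, ⟨⟨h3, h4⟩, (pvAffected_iff cm rows columns p.1 p.2).2 hv⟩, rfl⟩

-- pvAffectedL has no duplicates (row-major distinct pairs)
lemma pvAffectedL_nodup (cm : List (List Int)) (rows columns : Int) :
    (pvAffectedL cm rows columns).Nodup := by
  unfold pvAffectedL
  rw [List.nodup_flatMap]
  constructor
  · intro r _
    exact ((PySem.List.nodup_pyRange_one 0 columns).filter _).map
      (fun c c' h => by injection h)
  · refine (PySem.List.pairwise_lt_pyRange_one 0 rows).imp ?_
    intro a b hab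
    refine List.disjoint_left.2 ?_
    intro x hxa hxb
    rcases List.mem_map.1 hxa with ⟨c, _, rfl⟩
    rcases List.mem_map.1 hxb with ⟨c', _, h⟩
    have : b = a := congrArg Prod.fst h
    omega

lemma pv_mem_nbrs (rows columns : Int) (p x : Int × Int) :
    x ∈ pvNbrsOf rows columns p ↔
      ∃ d ∈ pvDirs, (0 ≤ p.1 + d.1 ∧ 0 ≤ p.2 + d.2 ∧ p.1 + d.1 < rows ∧ p.2 + d.2 < columns) ∧
        x = (p.1 + d.1, p.2 + d.2) := by
  simp only [pvNbrsOf, List.mem_map, List.mem_filter, decide_eq_true_eq]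
  constructor
  · rintro ⟨d, ⟨hd, hg⟩, rfl⟩
    exact ⟨d, hd, hg, rfl⟩
  · rintro ⟨d, hd, hg, rfl⟩
    exact ⟨d, ⟨hd, hg⟩, rfl⟩

-- the two ports visit the same SET of cells
lemma pv_toFinset_eq (cm : List (List Int)) (rows columns : Int) :
    ((pvInfectedL cm rows columns).flatMap (pvNbrsOf rows columns)).toFinset =
      (pvAffectedL cm rows columns).toFinset := by
  ext x
  simp only [List.mem_toFinset, List.mem_flatMap, pv_mem_infectedL, pv_mem_nbrs,
    pv_mem_affectedL]
  constructor
  · rintro ⟨q, hq, d, hd, hg, rfl⟩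
    refine ⟨⟨by omega, by omega, by omega, by omega⟩, (-d.1, -d.2), pvDirs_neg d hd, ?_⟩
    have e1 : q.1 + d.1 + (-d.1, -d.2).1 = q.1 := by ring
    have e2 : q.2 + d.2 + (-d.1, -d.2).2 = q.2 := by ring
    rw [show ((q.1 + d.1, q.2 + d.2) : Int × Int).1 = q.1 + d.1 from rfl,
      show ((q.1 + d.1, q.2 + d.2) : Int × Int).2 = q.2 + d.2 from rfl, e1, e2]
    exact ⟨hq.1, hq.2.1, hq.2.2.1, hq.2.2.2.1, hq.2.2.2.2⟩
  · rintro ⟨hx, d, hd, hg1, hg2, hg3, hg4, hv⟩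
    refine ⟨(x.1 + d.1, x.2 + d.2), ⟨hg1, hg2, hg3, hg4, hv⟩, (-d.1, -d.2),
      pvDirs_neg d hd, ⟨by simp; omega, by simp; omega, by simp; omega, by simp; omega⟩, ?_⟩
    have : x = (x.1, x.2) := rfl
    rw [this]
    simp

theorem potential_cases_spec : Claim_equal_potential_cases := by
  intro cm rows columns _ hpre
  show potential_cases cm rows columns = potential_cases_alt cm rows columns
  have hB : potential_cases_alt cm rows columns =
      ∑ p ∈ (pvAffectedL cm rows columns).toFinset, pvGetCell cm p.1 p.2 := by
    rw [pvB_eq_sum,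
      List.sum_toFinset (fun p : Int × Int => pvGetCell cm p.1 p.2)
        (pvAffectedL_nodup cm rows columns)]
  rcases hpre with h | h | ⟨hlen, hrow⟩
  · rw [hB]
    unfold potential_cases
    rw [PySem.List.pyRange_one_eq_nil (by omega : rows ≤ (0 : Int))]
    unfold pvAffectedL
    rw [PySem.List.pyRange_one_eq_nil (by omega : rows ≤ (0 : Int))]
    rfl
  · rw [hB]
    unfold potential_cases
    rw [pvScan_eq rows columns (fun row column => pvGetCell cm row column == -1),
      PySem.List.pyRange_one_eq_nil (by omega : columns ≤ (0 : Int))]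
    have hnil : (PySem.List.pyRange 0 rows 1).flatMap
        (fun row => (([] : List Int).filter (fun column => pvGetCell cm row column == -1)).map
          (fun column => ((row, column) : Int × Int))) = [] := by simp
    rw [hnil]
    unfold pvAffectedL
    rw [PySem.List.pyRange_one_eq_nil (by omega : columns ≤ (0 : Int))]
    have hnil2 : (PySem.List.pyRange 0 rows 1).flatMap
        (fun row => (([] : List Int).filter
          (fun column => pvAffected cm rows columns row column)).map
          (fun column => ((row, column) : Int × Int))) = [] := by simp
    rw [hnil2]
    rfl
  · have hval0 : ∀ q : Int × Int, (0 ≤ q.1 ∧ 0 ≤ q.2 ∧ q.1 < rows ∧ q.2 < columns) →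
        pvGetCell cm q.1 q.2 = if q ∈ (∅ : Finset (Int × Int)) then 0 else pvGetCell cm q.1 q.2 := by
      intro q _; simp
    have hLA : ∀ p ∈ (pvInfectedL cm rows columns).flatMap (pvNbrsOf rows columns),
        0 ≤ p.1 ∧ 0 ≤ p.2 ∧ p.1 < rows ∧ p.2 < columns := by
      intro p hp
      rw [List.mem_flatMap] at hp
      obtain ⟨q, _, hx⟩ := hp
      rw [pv_mem_nbrs] at hx
      obtain ⟨d, _, hg, rfl⟩ := hx
      exact ⟨hg.1, hg.2.1, hg.2.2.1, hg.2.2.2⟩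
    have hA : potential_cases cm rows columns =
        ∑ p ∈ ((pvInfectedL cm rows columns).flatMap (pvNbrsOf rows columns)).toFinset \ ∅,
          pvGetCell cm p.1 p.2 := by
      unfold potential_cases
      rw [pvScan_eq rows columns (fun row column => pvGetCell cm row column == -1)]
      rw [show ((PySem.List.pyRange 0 rows 1).flatMap (fun row =>
        ((PySem.List.pyRange 0 columns 1).filter (fun column => pvGetCell cm row column == -1)).map
          (fun column => (row, column)))) = pvInfectedL cm rows columns from rfl]
      rw [pvFoldA_flatten rows columns]
      rw [pvFold_zero cm rows columns hlen hrow _ hLA cm ∅ ⟨rfl, fun _ => rfl⟩ hval0 0]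
      ring
    rw [hA, hB, Finset.sdiff_empty, pv_toFinset_eq]
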